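-- pv_equiv track=rewrite | github.com/audreyrr/cs505_project | icl-without-copying/lib/plotting.py | find_induction_positions
-- ===== SOURCE A (Python) =====
-- def find_induction_positions(token_strings):
--     induction_positions = []
--
--     for i, token in enumerate(token_strings):
--         for j in range(i):
--             if token_strings[j] == token:
--                 if j + 1 < len(token_strings):
--                     induction_positions.append((i, j + 1))
--
--     return induction_positions
-- ===== SOURCE B (Python) =====
-- def find_induction_positions(token_strings):
--     # One pass: dict token -> list of prior indices; emit (i, j+1) for each prior match.
--     prior = {}
--     out = []
--     for i, token in enumerate(token_strings):
--         for j in prior.get(token, ()):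
--             out.append((i, j + 1))
--         prior.setdefault(token, []).append(i)
--     return out
-- ===== Notes on version B (the rewrite author's own statement) =====
-- stated objective: alternative
-- what changed: Replaces the inner rescan of all earlier positions with a single pass keeping a dict from token to its list of prior indices, emitting one pair per actual match (O(n + output) instead of O(n^2); on match-heavy inputs the output itself is quadratic, so no measured speed-up is claimed).
import Mathlib
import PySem

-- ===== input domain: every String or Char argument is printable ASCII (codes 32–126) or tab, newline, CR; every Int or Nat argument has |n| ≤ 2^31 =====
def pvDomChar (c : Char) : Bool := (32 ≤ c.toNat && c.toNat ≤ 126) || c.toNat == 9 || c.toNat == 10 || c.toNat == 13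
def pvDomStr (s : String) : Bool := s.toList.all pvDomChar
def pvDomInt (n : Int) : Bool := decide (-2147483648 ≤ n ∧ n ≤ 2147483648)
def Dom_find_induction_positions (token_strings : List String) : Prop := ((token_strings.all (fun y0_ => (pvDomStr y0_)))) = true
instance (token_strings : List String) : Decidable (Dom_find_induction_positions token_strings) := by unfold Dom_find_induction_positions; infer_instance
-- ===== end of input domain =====

-- B replaces A's rescan of all earlier positions with a one-pass dict of prior indices per token (objective: alternative).

-- ===== PORT A =====
def find_induction_positions (token_strings : List String) : List (Int × Int) :=
  (PySem.List.enumerate token_strings).foldl (fun acc p =>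
    (PySem.List.pyRange 0 p.1 1).foldl (fun acc2 j =>
      if PySem.List.pyGetD token_strings j "" = p.2 then
        if j + 1 < (token_strings.length : Int) then acc2 ++ [(p.1, j + 1)] else acc2
      else acc2) acc) []

-- ===== PORT B =====
def find_induction_positions_alt (token_strings : List String) : List (Int × Int) :=
  ((PySem.List.enumerate token_strings).foldl
    (fun (s : List (Int × Int) × PySem.Dict String (List Int)) p =>
      (s.1 ++ (s.2.getD p.2 []).map (fun j => (p.1, j + 1)),
       s.2.modify p.2 [] (· ++ [p.1])))
    ([], PySem.Dict.empty)).1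

-- ===== PRECONDITION & SPEC =====
def Spec_find_induction_positions (token_strings : List String) (out : List (Int × Int)) : Prop := out = find_induction_positions_alt token_strings
instance (token_strings : List String) (out : List (Int × Int)) : Decidable (Spec_find_induction_positions token_strings out) := by unfold Spec_find_induction_positions; infer_instance

-- ===== CLAIM (what is proved, stated in full; the proofs are below) =====
def Claim_equal_find_induction_positions : Prop := ∀ (token_strings : List String), Dom_find_induction_positions token_strings → Spec_find_induction_positions token_strings (find_induction_positions token_strings)

-- ===== LEMMAS AND PROOFS =====

-- A's per-position inner loop: the 'j + 1 < len' guard is always true (j < i < len), so it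
-- collects exactly the earlier indices holding the same token.
theorem pv_inner_loop (ts : List String) (i : Int) (tok : String)
    (hlt : i < (ts.length : Int)) (acc : List (Int × Int)) :
    (PySem.List.pyRange 0 i 1).foldl (fun acc2 j =>
      if PySem.List.pyGetD ts j "" = tok then
        if j + 1 < (ts.length : Int) then acc2 ++ [(i, j + 1)] else acc2
      else acc2) acc
    = acc ++ ((PySem.List.pyRange 0 i 1).filter
        (fun j => PySem.List.pyGetD ts j "" == tok)).map (fun j => (i, j + 1)) := by
  rw [PySem.List.foldl_congr_mem (g := fun acc2 j =>
    if PySem.List.pyGetD ts j "" == tok then acc2 ++ [(i, j + 1)] else acc2)]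
  · exact PySem.List.foldl_append_if _ _ _ _
  · intro acc2 j hj
    rw [PySem.List.mem_pyRange_one] at hj
    have : j + 1 < (ts.length : Int) := by omega
    simp [this]

-- Main fold equivalence, by induction on the remaining suffix, carrying the dict invariant:
-- after processing the first s tokens, d.getD tok [] is exactly the list of earlier indices
-- j < s with ts[j] = tok.
theorem pv_fold (ts : List String) (suf : List String) :
    ∀ (s : Int) (acc : List (Int × Int)) (d : PySem.Dict String (List Int)),
    0 ≤ s → (s : Int) + suf.length = ts.length → ts.drop s.toNat = suf →
    (∀ tok : String, d.getD tok []
      = (PySem.List.pyRange 0 s 1).filter (fun j => PySem.List.pyGetD ts j "" == tok)) →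
    (PySem.List.enumerate suf s).foldl (fun acc p =>
      (PySem.List.pyRange 0 p.1 1).foldl (fun acc2 j =>
        if PySem.List.pyGetD ts j "" = p.2 then
          if j + 1 < (ts.length : Int) then acc2 ++ [(p.1, j + 1)] else acc2
        else acc2) acc) acc
    = ((PySem.List.enumerate suf s).foldl
        (fun (st : List (Int × Int) × PySem.Dict String (List Int)) p =>
          (st.1 ++ (st.2.getD p.2 []).map (fun j => (p.1, j + 1)),
           st.2.modify p.2 [] (· ++ [p.1])))
        (acc, d)).1 := by
  induction suf with
  | nil => intro s acc d _ _ _ _; simp [PySem.List.enumerate_nil]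
  | cons x suf ih =>
    intro s acc d hs hlen hdrop hinv
    have hslen : s < (ts.length : Int) := by
      simp only [List.length_cons] at hlen; push_cast at hlen; omega
    have hget : PySem.List.pyGetD ts s "" = x := by
      rw [PySem.List.pyGetD_eq_getElem ts "" hs hslen]
      have h1 : ts[s.toNat]? = some x := by
        have h2 : (List.drop s.toNat ts)[0]? = ts[s.toNat + 0]? := List.getElem?_drop
        simpa [hdrop] using h2.symm
      rw [List.getElem_eq_iff]
      exact h1
    rw [PySem.List.enumerate_cons]
    simp only [List.foldl_cons]
    rw [pv_inner_loop ts s x hslen acc, hinv x]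
    exact ih (s + 1) _ _ (by omega)
      (by simp only [List.length_cons] at hlen; push_cast at hlen ⊢; omega)
      (by
        have : (s + 1).toNat = s.toNat + 1 := by omega
        rw [this, ← List.drop_drop, hdrop]; simp)
      (by
        intro tok
        rw [PySem.List.pyRange_one_succ_right hs, List.filter_append]
        by_cases htok : tok = x
        · subst htok
          rw [PySem.Dict.getD_modify_self, hinv]
          simp [hget]
        · rw [PySem.Dict.getD_modify_of_ne _ _ _ htok, hinv]
          simp only [List.filter_cons, List.filter_nil, hget]
          have hxt : x ≠ tok := fun hh => htok hh.symm
          have : (x == tok) = false := by simp [hxt]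
          simp [this])

theorem pv_equiv (ts : List String) : find_induction_positions ts = find_induction_positions_alt ts := by
  unfold find_induction_positions find_induction_positions_alt
  refine pv_fold ts ts 0 [] PySem.Dict.empty le_rfl (by simp) (by simp) ?_
  intro tok
  rw [PySem.List.pyRange_one_eq_nil le_rfl]
  simp

-- ===== VERDICT (by name: the statement is the Claim_ definition above) =====
theorem find_induction_positions_spec : Claim_equal_find_induction_positions := by
  intro ts _
  unfold Spec_find_induction_positions
  exact pv_equiv ts
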